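-- pv_equiv track=rewrite | github.com/sawzeeyy/w3av | w3av/modes/urls/aliases.py | get_best_alias
-- ===== SOURCE A (Python) =====
-- def get_best_alias(var_name, alias_table=None):
--     """
--     Returns the most meaningful alias for a variable name.
--
--     Heuristics:
--     1. Prefer high-confidence aliases
--     2. Avoid generic/temporary names (temp, tmp, val, etc.)
--     3. Avoid very generic names (id, key, name, value) - prefer more specific ones
--     4. Prefer names with meaningful suffixes (contentId over id, spaceKey over key)
--     5. Fall back to original variable name if no good alias found
--     """
--     if alias_table is None:
--         alias_table = {}
--
--     if var_name not in alias_table or not alias_table[var_name]: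
--         return var_name
--
--     # Generic patterns to avoid (substrings and full names)
--     generic_patterns = ['temp', 'tmp', 'val', 'test', 'dummy', 'placeholder']
--     generic_single = {'x', 'y', 'z', 'i', 'j', 'k', 'n', 'a', 'b', 'c', 'd', 'e'}
--     # Very generic but valid names - prefer more specific alternatives
--     very_generic = {'id', 'key', 'name', 'title', 'value', 'data', 'item', 'type'}
--
--     # Sort by confidence (high > medium > low)
--     confidence_order = {'high': 3, 'medium': 2, 'low': 1}
--
--     candidates = alias_table[var_name][:]
--
--     # Separate candidates into categories
--     specific_candidates = []      # Best: specific names like 'contentId', 'spaceKey'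
--     acceptable_candidates = []    # OK: not generic, not super specific
--     very_generic_candidates = []  # Last resort: 'id', 'key', 'name'
--     generic_candidates = []       # Avoid: 'temp', 'tmp', 'val'
--
--     for candidate in candidates:
--         alias = candidate['alias']
--         alias_lower = alias.lower()
--
--         # Check if it's a generic temporary name
--         is_temp_generic = (
--             alias_lower in generic_single or
--             any(pattern in alias_lower for pattern in generic_patterns)
--         )
--
--         if is_temp_generic:
--             generic_candidates.append(candidate)
--             continue
--
--         # Check if it's very generic but valid
--         if alias_lower in very_generic:
--             very_generic_candidates.append(candidate)
--             continue
--
--         # Check if it's a specific compound name (e.g., contentId, spaceKey)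
--         # These have a generic part but are more specific
--         has_generic_part = any(gen in alias_lower for gen in very_generic)
--         if has_generic_part and len(alias) > 4:  # Compound names are longer
--             specific_candidates.append(candidate)
--         else:
--             acceptable_candidates.append(candidate)
--
--     # Try each category in order of preference
--     for category in [specific_candidates, acceptable_candidates, very_generic_candidates, generic_candidates]:
--         if category:
--             # Within category, sort by confidence then by length (shorter better for similar confidence)
--             category.sort(
--                 key=lambda x: (confidence_order.get(x['confidence'], 0), -len(x['alias'])),
--                 reverse=True
--             )
--             return category[0]['alias']
--
--     return var_name
-- ===== SOURCE B (Python) =====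
-- def get_best_alias(var_name, alias_table=None):
--     """Pick the best alias by a single composite-key max pass (no buckets, no sort)."""
--     if alias_table is None:
--         alias_table = {}
--     if var_name not in alias_table or not alias_table[var_name]:
--         return var_name
--
--     generic_patterns = ['temp', 'tmp', 'val', 'test', 'dummy', 'placeholder']
--     generic_single = {'x', 'y', 'z', 'i', 'j', 'k', 'n', 'a', 'b', 'c', 'd', 'e'}
--     very_generic = {'id', 'key', 'name', 'title', 'value', 'data', 'item', 'type'}
--     confidence_order = {'high': 3, 'medium': 2, 'low': 1}
--
--     def rank(alias):
--         al = alias.lower()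
--         if al in generic_single or any(p in al for p in generic_patterns):
--             return 1                      # generic / temporary
--         if al in very_generic:
--             return 2                      # very generic but valid
--         if any(g in al for g in very_generic) and len(alias) > 4:
--             return 4                      # specific compound name
--         return 3                          # acceptable
--
--     # max is a single pass and returns the FIRST maximal element, which matches
--     # the stable bucket-then-confidence-then-shorter ordering of the original.
--     best = max(alias_table[var_name],
--                key=lambda c: (rank(c['alias']),
--                               confidence_order.get(c['confidence'], 0),
--                               -len(c['alias'])))
--     return best['alias']
-- ===== Notes on version B (the rewrite author's own statement) =====
-- stated objective: simpler
-- what changed: Replaces A's four bucket lists plus a per-bucket stable sort with a single max() pass over the candidates using one composite lexicographic key (bucket rank, confidence, -length), relying on max returning the first maximal element to reproduce A's stable tie-breaking.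
import Mathlib
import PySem

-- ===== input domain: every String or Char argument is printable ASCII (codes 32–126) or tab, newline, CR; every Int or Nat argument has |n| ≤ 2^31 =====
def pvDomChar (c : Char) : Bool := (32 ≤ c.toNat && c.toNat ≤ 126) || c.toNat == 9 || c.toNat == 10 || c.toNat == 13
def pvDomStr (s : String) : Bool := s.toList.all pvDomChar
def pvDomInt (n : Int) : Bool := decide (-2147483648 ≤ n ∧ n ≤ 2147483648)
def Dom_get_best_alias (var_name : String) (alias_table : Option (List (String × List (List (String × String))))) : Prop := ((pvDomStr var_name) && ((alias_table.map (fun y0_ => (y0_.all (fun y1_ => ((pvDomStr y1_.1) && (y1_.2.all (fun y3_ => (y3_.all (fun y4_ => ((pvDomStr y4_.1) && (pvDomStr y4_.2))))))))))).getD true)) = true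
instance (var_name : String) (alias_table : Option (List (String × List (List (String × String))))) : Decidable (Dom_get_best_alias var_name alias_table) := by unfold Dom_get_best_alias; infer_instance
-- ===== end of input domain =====

-- B replaces A's four bucket lists + per-bucket stable sort by one composite-key max pass (simpler); same return value on Pre_.

-- shared constant tables / record accessors (identical in both Pythons)
def pvPatterns : List String := ["temp", "tmp", "val", "test", "dummy", "placeholder"]
def pvSingles : List String := ["x", "y", "z", "i", "j", "k", "n", "a", "b", "c", "d", "e"]
def pvVG : List String := ["id", "key", "name", "title", "value", "data", "item", "type"]
-- confidence_order.get(x['confidence'], 0)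
def pvConfOrder (s : String) : Int := if s = "high" then 3 else if s = "medium" then 2 else if s = "low" then 1 else 0
-- candidate['alias'] / candidate['confidence']: Pre_ guarantees the keys exist, so the getD default never fires
def pvAlias (c : List (String × String)) : String := ((PySem.Dict.mk c).get? "alias").getD ""
def pvConf (c : List (String × String)) : Int := pvConfOrder (((PySem.Dict.mk c).get? "confidence").getD "")
def pvNLen (c : List (String × String)) : Int := -(PySem.Str.len (pvAlias c))

-- ===== PORT A =====
-- loop body of A: route the candidate into one of the four category lists (spec, acceptable, very_generic, generic)
def pvStepA (st : List (List (String × String)) × List (List (String × String)) × List (List (String × String)) × List (List (String × String)))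
    (candidate : List (String × String)) :
    List (List (String × String)) × List (List (String × String)) × List (List (String × String)) × List (List (String × String)) :=
  let al := PySem.Str.lower (pvAlias candidate)
  if pvSingles.contains al || pvPatterns.any (fun p => PySem.Str.isIn p al) then
    (st.1, st.2.1, st.2.2.1, st.2.2.2 ++ [candidate])
  else if pvVG.contains al then
    (st.1, st.2.1, st.2.2.1 ++ [candidate], st.2.2.2)
  else if pvVG.any (fun g => PySem.Str.isIn g al) && decide (4 < PySem.Str.len (pvAlias candidate)) then
    (st.1 ++ [candidate], st.2.1, st.2.2.1, st.2.2.2)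
  else
    (st.1, st.2.1 ++ [candidate], st.2.2.1, st.2.2.2)

-- category.sort(key=lambda x: (conf, -len), reverse=True); return category[0]['alias']  (category checked nonempty)
def pvPickA (cat : List (List (String × String))) : String :=
  match PySem.List.sorted2 cat pvConf pvNLen true with
  | c :: _ => pvAlias c
  | [] => ""

def get_best_alias (var_name : String) (alias_table : Option (List (String × List (List (String × String))))) : String :=
  let table := PySem.Dict.mk (alias_table.getD [])
  match table.get? var_name with
  | none => var_name
  | some cands =>
    if cands = [] then var_name
    else
      let st := cands.foldl pvStepA ([], [], [], [])
      if st.1 ≠ [] then pvPickA st.1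
      else if st.2.1 ≠ [] then pvPickA st.2.1
      else if st.2.2.1 ≠ [] then pvPickA st.2.2.1
      else if st.2.2.2 ≠ [] then pvPickA st.2.2.2
      else var_name

-- ===== PORT B =====
-- rank(alias): single classification, highest is best
def pvRank (c : List (String × String)) : Int :=
  let al := PySem.Str.lower (pvAlias c)
  if pvSingles.contains al || pvPatterns.any (fun p => PySem.Str.isIn p al) then 1
  else if pvVG.contains al then 2
  else if pvVG.any (fun g => PySem.Str.isIn g al) && decide (4 < PySem.Str.len (pvAlias c)) then 4
  else 3

def pvKey (c : List (String × String)) : Int × Int × Int := (pvRank c, pvConf c, pvNLen c)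

-- Python tuple '<' (lexicographic, strict)
def pvLt (p q : Int × Int × Int) : Bool :=
  decide (p.1 < q.1) || (p.1 == q.1 && (decide (p.2.1 < q.2.1) || (p.2.1 == q.2.1 && decide (p.2.2 < q.2.2))))

def get_best_alias_alt (var_name : String) (alias_table : Option (List (String × List (List (String × String))))) : String :=
  let table := PySem.Dict.mk (alias_table.getD [])
  match table.get? var_name with
  | none => var_name
  | some cands =>
    match cands with
    | [] => var_name
    | c :: rest =>
      -- max(cands, key=...): one pass, keeps the current element unless a later one is strictly greater
      pvAlias (rest.foldl (fun best x => if pvLt (pvKey best) (pvKey x) then x else best) c)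

-- ===== PRECONDITION & SPEC =====
-- Pre_ excludes inputs on which some candidate record under var_name lacks an alias or a confidence key: there
-- A raises KeyError (or, when only an unsorted loser's confidence entry is missing, A returns while B raises KeyError).
def Pre_get_best_alias (var_name : String) (alias_table : Option (List (String × List (List (String × String))))) : Prop :=
  ∀ c ∈ (((PySem.Dict.mk (alias_table.getD [])).get? var_name).getD []),
    (c.map Prod.fst).contains "alias" = true ∧ (c.map Prod.fst).contains "confidence" = true
instance (var_name : String) (alias_table : Option (List (String × List (List (String × String))))) : Decidable (Pre_get_best_alias var_name alias_table) := by unfold Pre_get_best_alias; infer_instance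

def pvWitness_get_best_alias : String × (Option (List (String × List (List (String × String))))) :=
  ("v", some [("v", [[("alias", "contentId"), ("confidence", "high")]])])

def Spec_get_best_alias (var_name : String) (alias_table : Option (List (String × List (List (String × String))))) (out : String) : Prop := out = get_best_alias_alt var_name alias_table
instance (var_name : String) (alias_table : Option (List (String × List (List (String × String))))) (out : String) : Decidable (Spec_get_best_alias var_name alias_table out) := by unfold Spec_get_best_alias; infer_instance

-- ===== CLAIM (what is proved, stated in full; the proofs are below) =====
def Claim_equal_get_best_alias : Prop := ∀ (var_name : String) (alias_table : Option (List (String × List (List (String × String))))), Dom_get_best_alias var_name alias_table → Pre_get_best_alias var_name alias_table → Spec_get_best_alias var_name alias_table (get_best_alias var_name alias_table)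

-- ===== LEMMAS AND PROOFS =====

-- first-max fold of B
def pvFM3 (c : List (String × String)) (cs : List (List (String × String))) : List (String × String) :=
  cs.foldl (fun best x => if pvLt (pvKey best) (pvKey x) then x else best) c

-- the comparison sorted2 … true uses between bucket members, seen from the head of the accumulator
def pvLt2 (b x : List (String × String)) : Bool :=
  decide (pvConf b < pvConf x) || (!decide (pvConf x < pvConf b) && decide (pvNLen b < pvNLen x))

def pvFM2 (c : List (String × String)) (cs : List (List (String × String))) : List (String × String) :=
  cs.foldl (fun best x => if pvLt2 best x then x else best) c

lemma pvLtKey_iff (b x : List (String × String)) : pvLt (pvKey b) (pvKey x) = true ↔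
    (pvRank b < pvRank x ∨ (pvRank b = pvRank x ∧ (pvConf b < pvConf x ∨ (pvConf b = pvConf x ∧ pvNLen b < pvNLen x)))) := by
  simp [pvLt, pvKey]

lemma pvLtKey_false_iff (b x : List (String × String)) : pvLt (pvKey b) (pvKey x) = false ↔
    ¬ (pvRank b < pvRank x ∨ (pvRank b = pvRank x ∧ (pvConf b < pvConf x ∨ (pvConf b = pvConf x ∧ pvNLen b < pvNLen x)))) := by
  rw [← pvLtKey_iff]; simp

lemma pvLt2_iff (b x : List (String × String)) : pvLt2 b x = true ↔
    (pvConf b < pvConf x ∨ (¬ (pvConf x < pvConf b) ∧ pvNLen b < pvNLen x)) := by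
  simp [pvLt2]

lemma pvLt2_false_iff (b x : List (String × String)) : pvLt2 b x = false ↔
    ¬ (pvConf b < pvConf x ∨ (¬ (pvConf x < pvConf b) ∧ pvNLen b < pvNLen x)) := by
  rw [← pvLt2_iff]; simp

lemma pvRank_cases (c : List (String × String)) :
    pvRank c = 1 ∨ pvRank c = 2 ∨ pvRank c = 3 ∨ pvRank c = 4 := by
  unfold pvRank; dsimp only; split_ifs <;> simp

-- sorted head: the head of the reverse stable sort is the running first-max of the list
lemma foldl_insertBy_head {α : Type} (before : α → α → Bool) :
    ∀ (xs : List α) (y : α) (ys : List α), ∃ t,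
      xs.foldl (fun acc x => PySem.List.insertBy before x acc) (y :: ys)
        = (xs.foldl (fun m x => if before x m then x else m) y) :: t := by
  intro xs
  induction xs with
  | nil => intro y ys; exact ⟨ys, rfl⟩
  | cons x xs ih =>
    intro y ys
    simp only [List.foldl_cons, PySem.List.insertBy]
    by_cases h : before x y
    · simp only [h, if_true]
      exact ih x (y :: ys)
    · simp only [h, if_false, Bool.false_eq_true]
      exact ih y (PySem.List.insertBy before x ys)

lemma pvPickA_eq_FM2 (c : List (String × String)) (cs : List (List (String × String))) :
    pvPickA (c :: cs) = pvAlias (pvFM2 c cs) := by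
  obtain ⟨t, ht⟩ := foldl_insertBy_head (fun a b => pvLt2 b a) cs c []
  have hs : PySem.List.sorted2 (c :: cs) pvConf pvNLen true = pvFM2 c cs :: t := by
    unfold PySem.List.sorted2
    dsimp only
    rw [if_pos rfl, List.foldl_cons]
    have h0 : PySem.List.insertBy (fun a b => pvLt2 b a) c [] = [c] := by
      simp [PySem.List.insertBy]
    exact h0 ▸ ht
  unfold pvPickA
  rw [hs]

-- A's bucket fold computes the four rank filters
lemma foldl_stepA (cs : List (List (String × String))) :
    ∀ s a v g, cs.foldl pvStepA (s, a, v, g) =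
      (s ++ cs.filter (fun c => pvRank c == 4), a ++ cs.filter (fun c => pvRank c == 3),
       v ++ cs.filter (fun c => pvRank c == 2), g ++ cs.filter (fun c => pvRank c == 1)) := by
  induction cs with
  | nil => simp
  | cons x cs ih =>
    intro s a v g
    rw [List.foldl_cons]
    by_cases h1 : (pvSingles.contains (PySem.Str.lower (pvAlias x)) ||
        pvPatterns.any fun p => PySem.Str.isIn p (PySem.Str.lower (pvAlias x))) = true
    · have hr : pvRank x = 1 := by unfold pvRank; dsimp only; rw [if_pos h1]
      have hst : pvStepA (s, a, v, g) x = (s, a, v, g ++ [x]) := by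
        unfold pvStepA; dsimp only; rw [if_pos h1]
      rw [hst, ih]
      simp [hr]
    · by_cases h2 : pvVG.contains (PySem.Str.lower (pvAlias x)) = true
      · have hr : pvRank x = 2 := by unfold pvRank; dsimp only; rw [if_neg h1, if_pos h2]
        have hst : pvStepA (s, a, v, g) x = (s, a, v ++ [x], g) := by
          unfold pvStepA; dsimp only; rw [if_neg h1, if_pos h2]
        rw [hst, ih]
        simp [hr]
      · by_cases h3 : ((pvVG.any fun gg => PySem.Str.isIn gg (PySem.Str.lower (pvAlias x))) &&
            decide (4 < PySem.Str.len (pvAlias x))) = true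
        · have hr : pvRank x = 4 := by unfold pvRank; dsimp only; rw [if_neg h1, if_neg h2, if_pos h3]
          have hst : pvStepA (s, a, v, g) x = (s ++ [x], a, v, g) := by
            unfold pvStepA; dsimp only; rw [if_neg h1, if_neg h2, if_pos h3]
          rw [hst, ih]
          simp [hr]
        · have hr : pvRank x = 3 := by unfold pvRank; dsimp only; rw [if_neg h1, if_neg h2, if_neg h3]
          have hst : pvStepA (s, a, v, g) x = (s, a ++ [x], v, g) := by
            unfold pvStepA; dsimp only; rw [if_neg h1, if_neg h2, if_neg h3]
          rw [hst, ih]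
          simp [hr]

lemma pvFM3_max : ∀ (cs : List (List (String × String))) (c : List (String × String)),
    pvLt (pvKey (pvFM3 c cs)) (pvKey c) = false ∧
    ∀ y ∈ cs, pvLt (pvKey (pvFM3 c cs)) (pvKey y) = false := by
  intro cs
  induction cs with
  | nil =>
    intro c
    refine ⟨?_, by simp⟩
    show pvLt (pvKey c) (pvKey c) = false
    rw [pvLtKey_false_iff]; omega
  | cons x cs ih =>
    intro c
    have hfm : pvFM3 c (x :: cs) = pvFM3 (if pvLt (pvKey c) (pvKey x) then x else c) cs := by
      unfold pvFM3; rw [List.foldl_cons]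
    obtain ⟨ih1, ih2⟩ := ih (if pvLt (pvKey c) (pvKey x) then x else c)
    by_cases hcx : pvLt (pvKey c) (pvKey x) = true
    · rw [if_pos hcx] at ih1 ih2
      rw [hfm, if_pos hcx]
      refine ⟨?_, ?_⟩
      · rw [pvLtKey_false_iff] at ih1 ⊢
        rw [pvLtKey_iff] at hcx
        omega
      · intro y hy
        rcases List.mem_cons.mp hy with h | h
        · subst h; exact ih1
        · exact ih2 y h
    · rw [if_neg hcx] at ih1 ih2
      rw [hfm, if_neg hcx]
      refine ⟨ih1, ?_⟩
      intro y hy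
      rcases List.mem_cons.mp hy with h | h
      · subst h
        rw [pvLtKey_false_iff] at ih1 ⊢
        have hcx' := (Bool.not_eq_true _).mp hcx
        rw [pvLtKey_false_iff] at hcx'
        omega
      · exact ih2 y h

lemma pvFM3_cases : ∀ (cs : List (List (String × String))) (c : List (String × String)),
    pvFM3 c cs = c ∨ pvLt (pvKey c) (pvKey (pvFM3 c cs)) = true := by
  intro cs
  induction cs with
  | nil => intro c; exact Or.inl rfl
  | cons x cs ih =>
    intro c
    have hfm : pvFM3 c (x :: cs) = pvFM3 (if pvLt (pvKey c) (pvKey x) then x else c) cs := by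
      unfold pvFM3; rw [List.foldl_cons]
    by_cases hcx : pvLt (pvKey c) (pvKey x) = true
    · rw [hfm, if_pos hcx]
      rcases ih x with h | h
      · rw [h]; exact Or.inr hcx
      · refine Or.inr ?_
        rw [pvLtKey_iff] at hcx h ⊢
        omega
    · rw [hfm, if_neg hcx]
      exact ih c

-- the bucket of the winner's rank is nonempty and its first-max under (conf, -len) is the overall first-max
lemma pvMain : ∀ (cs : List (List (String × String))) (c : List (String × String)),
    ∃ d ds, (c :: cs).filter (fun z => pvRank z == pvRank (pvFM3 c cs)) = d :: ds ∧
      pvFM2 d ds = pvFM3 c cs := by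
  intro cs
  induction cs with
  | nil =>
    intro c
    refine ⟨c, [], ?_, rfl⟩
    simp [pvFM3]
  | cons x cs ih =>
    intro c
    have hfm : pvFM3 c (x :: cs) = pvFM3 (if pvLt (pvKey c) (pvKey x) then x else c) cs := by
      unfold pvFM3; rw [List.foldl_cons]
    by_cases hcx : pvLt (pvKey c) (pvKey x) = true
    · have hfm2 : pvFM3 c (x :: cs) = pvFM3 x cs := by rw [hfm, if_pos hcx]
      obtain ⟨d, ds, hF, hFM⟩ := ih x
      simp only [hfm2]
      by_cases hc : pvRank c = pvRank (pvFM3 x cs)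
      · have hmax := (pvFM3_max (x :: cs) c).2 x (List.mem_cons_self)
        rw [hfm2, pvLtKey_false_iff] at hmax
        rw [pvLtKey_iff] at hcx
        have hx : pvRank x = pvRank (pvFM3 x cs) := by omega
        have hFx : (x :: cs).filter (fun z => pvRank z == pvRank (pvFM3 x cs))
            = x :: cs.filter (fun z => pvRank z == pvRank (pvFM3 x cs)) := by
          rw [List.filter_cons, if_pos (by simpa using hx)]
        rw [hFx] at hF
        obtain ⟨hd, hds⟩ := List.cons.injEq .. ▸ hF
        subst hd
        refine ⟨c, x :: ds, ?_, ?_⟩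
        · rw [List.filter_cons, if_pos (by simpa using hc), hFx, hds]
        · have h2 : pvLt2 c x = true := by rw [pvLt2_iff]; omega
          unfold pvFM2
          rw [List.foldl_cons]
          rw [if_pos h2]
          exact hFM
      · refine ⟨d, ds, ?_, hFM⟩
        rw [List.filter_cons, if_neg (by simpa using hc)]
        exact hF
    · have hfm2 : pvFM3 c (x :: cs) = pvFM3 c cs := by rw [hfm, if_neg hcx]
      obtain ⟨d, ds, hF, hFM⟩ := ih c
      simp only [hfm2]
      have hcx' : pvLt (pvKey c) (pvKey x) = false := by
        cases h : pvLt (pvKey c) (pvKey x)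
        · rfl
        · exact absurd h hcx
      rw [pvLtKey_false_iff] at hcx'
      by_cases hx : pvRank x = pvRank (pvFM3 c cs)
      · have hrc : pvRank c = pvRank (pvFM3 c cs) := by
          rcases pvFM3_cases cs c with h | h
          · rw [h]
          · rw [pvLtKey_iff] at h; omega
        have hFc : (c :: cs).filter (fun z => pvRank z == pvRank (pvFM3 c cs))
            = c :: cs.filter (fun z => pvRank z == pvRank (pvFM3 c cs)) := by
          rw [List.filter_cons, if_pos (by simpa using hrc)]
        rw [hFc] at hF
        obtain ⟨hd, hds⟩ := List.cons.injEq .. ▸ hF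
        subst hd
        refine ⟨c, x :: ds, ?_, ?_⟩
        · rw [List.filter_cons, if_pos (by simpa using hrc), List.filter_cons,
            if_pos (by simpa using hx), hds]
        · have h2 : pvLt2 c x = false := by rw [pvLt2_false_iff]; omega
          unfold pvFM2
          rw [List.foldl_cons]
          rw [if_neg (by simp [h2])]
          exact hFM
      · refine ⟨d, ds, ?_, hFM⟩
        have hxa : (x :: cs).filter (fun z => pvRank z == pvRank (pvFM3 c cs))
            = cs.filter (fun z => pvRank z == pvRank (pvFM3 c cs)) := by
          rw [List.filter_cons, if_neg (by simpa using hx)]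
        rw [List.filter_cons, hxa]
        rw [List.filter_cons] at hF
        exact hF

-- ===== VERDICT (by name: the statement is the Claim_ definition above) =====
lemma pvRank_le_fm (cs : List (List (String × String))) (c : List (String × String)) :
    ∀ y ∈ c :: cs, pvRank y ≤ pvRank (pvFM3 c cs) := by
  intro y hy
  rcases List.mem_cons.mp hy with h | h
  · subst h
    have h1 := (pvFM3_max cs y).1
    rw [pvLtKey_false_iff] at h1
    omega
  · have h1 := (pvFM3_max cs c).2 y h
    rw [pvLtKey_false_iff] at h1
    omega

lemma pvFilter_hi (cs : List (List (String × String))) (c : List (String × String)) (r : Int)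
    (hr : pvRank (pvFM3 c cs) < r) :
    (c :: cs).filter (fun z => pvRank z == r) = [] := by
  rw [List.filter_eq_nil_iff]
  intro y hy
  simp only [beq_iff_eq]
  have := pvRank_le_fm cs c y hy
  omega

lemma pv_core (fb : String) (c : List (String × String)) (cs : List (List (String × String))) :
    (if (c :: cs).filter (fun z => pvRank z == 4) ≠ [] then pvPickA ((c :: cs).filter (fun z => pvRank z == 4))
     else if (c :: cs).filter (fun z => pvRank z == 3) ≠ [] then pvPickA ((c :: cs).filter (fun z => pvRank z == 3))
     else if (c :: cs).filter (fun z => pvRank z == 2) ≠ [] then pvPickA ((c :: cs).filter (fun z => pvRank z == 2))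
     else if (c :: cs).filter (fun z => pvRank z == 1) ≠ [] then pvPickA ((c :: cs).filter (fun z => pvRank z == 1))
     else fb) = pvAlias (pvFM3 c cs) := by
  obtain ⟨d, ds, hF, hFM⟩ := pvMain cs c
  rcases pvRank_cases (pvFM3 c cs) with h | h | h | h
  · simp only [h] at hF
    rw [if_neg (by simp [pvFilter_hi cs c 4 (by omega)]),
        if_neg (by simp [pvFilter_hi cs c 3 (by omega)]),
        if_neg (by simp [pvFilter_hi cs c 2 (by omega)]),
        hF, if_pos (by simp)]
    rw [pvPickA_eq_FM2, hFM]
  · simp only [h] at hF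
    rw [if_neg (by simp [pvFilter_hi cs c 4 (by omega)]),
        if_neg (by simp [pvFilter_hi cs c 3 (by omega)]),
        hF, if_pos (by simp)]
    rw [pvPickA_eq_FM2, hFM]
  · simp only [h] at hF
    rw [if_neg (by simp [pvFilter_hi cs c 4 (by omega)]),
        hF, if_pos (by simp)]
    rw [pvPickA_eq_FM2, hFM]
  · simp only [h] at hF
    rw [hF, if_pos (by simp)]
    rw [pvPickA_eq_FM2, hFM]

theorem get_best_alias_spec : Claim_equal_get_best_alias := by
  intro var_name alias_table _ _
  unfold Spec_get_best_alias get_best_alias get_best_alias_alt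
  dsimp only
  cases hq : (PySem.Dict.mk (alias_table.getD [])).get? var_name with
  | none => rfl
  | some cands =>
    cases cands with
    | nil => simp
    | cons c cs =>
      dsimp only
      rw [if_neg (by simp)]
      rw [foldl_stepA (c :: cs) [] [] [] []]
      simp only [List.nil_append]
      exact pv_core var_name c cs
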